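-- pv_equiv track=rewrite | github.com/Bllose/Bllools | sources/grouping/objects/ClassRoom.py | getDuplicationTimes
-- ===== SOURCE A (Python) =====
-- def getDuplicationTimes(one_hander:tuple, another_hander:tuple) -> int:
--     result = 0
--     temp_list = []
--     for cur in one_hander + another_hander:
--         if cur in temp_list:
--             result += 1
--         else:
--             temp_list.append(cur)
--     return result
-- ===== SOURCE B (Python) =====
-- def getDuplicationTimes(one_hander: tuple, another_hander: tuple) -> int:
--     combined = one_hander + another_hander
--     return len(combined) - len(set(combined))
-- ===== Notes on version B (the rewrite author's own statement) =====
-- stated objective: simpler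
-- what changed: Replaces A's accumulate-and-test loop over a growing seen-list with a closed-form cardinality difference: len(combined) - len(set(combined)).
import Mathlib
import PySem

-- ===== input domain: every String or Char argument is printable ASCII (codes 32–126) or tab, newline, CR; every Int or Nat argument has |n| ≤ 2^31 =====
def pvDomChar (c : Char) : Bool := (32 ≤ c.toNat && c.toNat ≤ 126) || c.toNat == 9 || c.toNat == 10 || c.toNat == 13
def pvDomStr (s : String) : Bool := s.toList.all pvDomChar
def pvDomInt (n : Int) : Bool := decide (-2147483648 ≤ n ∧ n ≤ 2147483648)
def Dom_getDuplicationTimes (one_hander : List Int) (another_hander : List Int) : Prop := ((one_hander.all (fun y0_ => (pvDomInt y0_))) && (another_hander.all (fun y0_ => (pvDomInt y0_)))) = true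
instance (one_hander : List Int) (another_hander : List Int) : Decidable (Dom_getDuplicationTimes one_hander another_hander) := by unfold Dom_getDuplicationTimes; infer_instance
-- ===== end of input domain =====

-- B replaces A's quadratic seen-list loop with the closed form len(combined) - len(set(combined)) (simpler, asymptotically faster).

-- ===== PORT A =====
-- Literal port of A: fold over the concatenation carrying (result, temp_list).
def getDuplicationTimes (one_hander : List Int) (another_hander : List Int) : Int :=
  ((one_hander ++ another_hander).foldl
    (fun (st : Int × List Int) cur =>
      if st.2.contains cur then (st.1 + 1, st.2) else (st.1, st.2 ++ [cur]))
    (0, [])).1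

-- ===== PORT B =====
def getDuplicationTimes_alt (one_hander : List Int) (another_hander : List Int) : Int :=
  let combined := one_hander ++ another_hander
  (combined.length : Int) - ((PySem.Set.ofList combined).length : Int)

-- ===== PRECONDITION & SPEC =====
def Spec_getDuplicationTimes (one_hander : List Int) (another_hander : List Int) (out : Int) : Prop := out = getDuplicationTimes_alt one_hander another_hander
instance (one_hander : List Int) (another_hander : List Int) (out : Int) : Decidable (Spec_getDuplicationTimes one_hander another_hander out) := by unfold Spec_getDuplicationTimes; infer_instance

-- ===== CLAIM (what is proved, stated in full; the proofs are below) =====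
def Claim_equal_getDuplicationTimes : Prop := ∀ (one_hander : List Int) (another_hander : List Int), Dom_getDuplicationTimes one_hander another_hander → Spec_getDuplicationTimes one_hander another_hander (getDuplicationTimes one_hander another_hander)

-- ===== LEMMAS AND PROOFS =====

-- Loop invariant: A's fold counts exactly the elements that do not enlarge the seen set.
lemma getDup_loop_inv : ∀ (xs : List Int) (r : Int) (s : List Int),
    (xs.foldl
      (fun (st : Int × List Int) cur =>
        if st.2.contains cur then (st.1 + 1, st.2) else (st.1, st.2 ++ [cur]))
      (r, s)).1
    = r + (xs.length : Int) - (((xs.foldl PySem.Set.add s).length : Int) - (s.length : Int)) := by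
  intro xs
  induction xs with
  | nil => intro r s; simp
  | cons x xs ih =>
    intro r s
    by_cases h : s.contains x = true
    · simp only [List.foldl_cons, if_pos, PySem.Set.add, PySem.Set.contains, h]
      rw [ih]
      simp only [List.length_cons]
      push_cast
      ring
    · simp only [List.foldl_cons, h, if_neg, PySem.Set.add, PySem.Set.contains,
        Bool.false_eq_true, not_false_eq_true]
      rw [ih]
      simp only [List.length_cons, List.length_append, List.length_nil]
      push_cast
      ring

-- ===== VERDICT (by name: the statement is the Claim_ definition above) =====
theorem getDuplicationTimes_spec : Claim_equal_getDuplicationTimes := by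
  intro one another _
  show getDuplicationTimes one another = getDuplicationTimes_alt one another
  unfold getDuplicationTimes getDuplicationTimes_alt
  rw [getDup_loop_inv]
  simp [PySem.Set.ofList_eq_foldl]
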